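-- pv_equiv track=rewrite | github.com/jacquesj1/projet_sqal | backend-api/app/ml/euralis/courbes_personnalisees.py | _appliquer_ajustements_personnalises
-- ===== SOURCE A (Python) =====
-- from typing import Dict, List, Optional, Tuple
--
-- def _appliquer_ajustements_personnalises(
--
--     courbe: List[Dict],
--     ajustements: Dict
-- ) -> List[Dict]:
--     """
--     Applique des ajustements personnalisés à la courbe
--
--     Exemples d'ajustements:
--     - {"jour_5_boost": 50} -> +50g au jour 5
--     - {"jours_1_3_reduction": 30} -> -30g jours 1-3
--     """
--     courbe_modifiee = [j.copy() for j in courbe]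
--
--     for key, valeur in ajustements.items():
--         if key.startswith("jour_") and "_boost" in key:
--             jour_num = int(key.split("_")[1])
--             for jour in courbe_modifiee:
--                 if jour["jour"] == jour_num:
--                     jour["matin"] += valeur // 2
--                     jour["soir"] += valeur // 2
--                     jour["total"] += valeur
--                     break
--
--     return courbe_modifiee
-- ===== SOURCE B (Python) =====
-- def _appliquer_ajustements_personnalises(courbe, ajustements):
--     # Alternative: group boost values by day first, then sweep the curve once,
--     # consuming each day's queued boosts at its first matching row.
--     boosts = {}
--     for key, valeur in ajustements.items():
--         if key.startswith("jour_") and "_boost" in key: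
--             boosts.setdefault(int(key.split("_")[1]), []).append(valeur)
--     if not boosts:
--         return [jour.copy() for jour in courbe]
--     resultat = []
--     for jour in courbe:
--         jour = jour.copy()
--         for valeur in boosts.pop(jour["jour"], ()):
--             jour["matin"] += valeur // 2
--             jour["soir"] += valeur // 2
--             jour["total"] += valeur
--         resultat.append(jour)
--     return resultat
-- ===== Notes on version B (the rewrite author's own statement) =====
-- stated objective: alternative
-- what changed: A rescans the whole curve for each boost adjustment; B groups the boost values by day in one pass over the adjustments and then sweeps the curve once, consuming each day's queued values at its first matching row (asymptotically fewer row visits, same measured cost on the benchmark inputs).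
import Mathlib
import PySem

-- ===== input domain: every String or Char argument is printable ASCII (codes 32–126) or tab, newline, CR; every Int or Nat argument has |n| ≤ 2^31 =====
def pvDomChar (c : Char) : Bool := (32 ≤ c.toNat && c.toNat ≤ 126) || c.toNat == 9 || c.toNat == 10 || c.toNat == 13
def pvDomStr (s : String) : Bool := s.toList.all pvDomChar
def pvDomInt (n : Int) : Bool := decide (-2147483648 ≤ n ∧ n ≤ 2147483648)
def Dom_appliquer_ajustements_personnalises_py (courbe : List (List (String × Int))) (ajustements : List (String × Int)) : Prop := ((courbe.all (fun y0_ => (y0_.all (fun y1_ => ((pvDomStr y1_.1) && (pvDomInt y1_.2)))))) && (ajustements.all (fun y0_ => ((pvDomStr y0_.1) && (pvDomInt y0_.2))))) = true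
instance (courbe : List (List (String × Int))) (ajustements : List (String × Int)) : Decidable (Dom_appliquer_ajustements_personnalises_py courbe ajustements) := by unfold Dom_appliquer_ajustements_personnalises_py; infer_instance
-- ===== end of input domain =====

-- B replaces A's per-adjustment scan of the whole curve by one grouping pass over the
-- adjustments plus one sweep over the curve (objective: alternative algorithm).
-- Return value only: A mutates nothing observable (it copies each row first), and so does B.

-- shared helpers (both Pythons contain these very expressions/statements verbatim)
-- key.startswith("jour_") and "_boost" in key
def pvIsBoostKey (k : String) : Bool := PySem.Str.startswith k "jour_" && PySem.Str.isIn "_boost" k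

-- int(key.split("_")[1]); the [1] index always exists under startswith("jour_"),
-- so the total .getD 1 "" is exact there; ofStr? none = ValueError (excluded by Pre_)
def pvJourNum? (k : String) : Option Int := PySem.Int.ofStr? (((PySem.Str.split? k "_").getD []).getD 1 "")

-- the three update statements: matin += v//2; soir += v//2; total += v
def pvUpRow (r : PySem.Dict String Int) (v : Int) : PySem.Dict String Int :=
  ((r.modify "matin" 0 (· + PySem.Int.floordiv v 2)).modify "soir" 0
      (· + PySem.Int.floordiv v 2)).modify "total" 0 (· + v)

-- ===== PORT A =====
-- inner 'for jour in courbe_modifiee: … break': scan to the first row with jour["jour"] == jour_num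
def pvApplyBoost (rows : List (PySem.Dict String Int)) (jn v : Int) : List (PySem.Dict String Int) :=
  match rows with
  | [] => []
  | r :: rs => if r.get? "jour" == some jn then pvUpRow r v :: rs else r :: pvApplyBoost rs jn v

def appliquer_ajustements_personnalises_py (courbe : List (List (String × Int))) (ajustements : List (String × Int)) : List (List (String × Int)) :=
  -- courbe_modifiee = [j.copy() for j in courbe]
  let courbe_modifiee := courbe.map (fun j => PySem.Dict.ofList j)
  -- for key, valeur in ajustements.items(): if <boost key>: jour_num = int(…); <scan & break>
  ((PySem.Dict.ofList ajustements).items.foldl (fun cm kv =>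
      if pvIsBoostKey kv.1 then
        match pvJourNum? kv.1 with
        | some jn => pvApplyBoost cm jn kv.2
        | none => cm          -- Python raises ValueError here (outside Pre_)
      else cm) courbe_modifiee).map (·.items)

-- ===== PORT B =====
-- for jour in courbe: jour = jour.copy(); for valeur in boosts.pop(jour["jour"], ()): <updates>; resultat.append(jour)
def pvSweep (boosts : PySem.Dict Int (List Int)) (rows : List (PySem.Dict String Int)) : List (List (String × Int)) :=
  match rows with
  | [] => []
  | r :: rs =>
    match r.get? "jour" with
    | none => r.items :: pvSweep boosts rs       -- Python raises KeyError here (outside Pre_)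
    | some d =>
      match boosts.pop? d with
      | none => r.items :: pvSweep boosts rs     -- pop default (): no boost for this day
      | some (vs, boosts') => (vs.foldl pvUpRow r).items :: pvSweep boosts' rs

def appliquer_ajustements_personnalises_py_alt (courbe : List (List (String × Int))) (ajustements : List (String × Int)) : List (List (String × Int)) :=
  -- boosts = {}; for key, valeur in ajustements.items(): if <boost key>: boosts.setdefault(int(…), []).append(valeur)
  let boosts := (PySem.Dict.ofList ajustements).items.foldl (fun b kv =>
      if pvIsBoostKey kv.1 then
        match pvJourNum? kv.1 with
        | some jn => b.modify jn [] (· ++ [kv.2])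
        | none => b
      else b) PySem.Dict.empty
  -- if not boosts: return [jour.copy() for jour in courbe]
  if boosts.items.isEmpty then courbe.map (fun j => (PySem.Dict.ofList j).items)
  else pvSweep boosts (courbe.map (fun j => PySem.Dict.ofList j))

-- ===== PRECONDITION & SPEC =====
-- Pre_ excludes (i) adjustments whose boost key's day segment is not an int — A raises
-- ValueError there — and (ii), when at least one boost key is present, curves with a row
-- missing one of the fields "jour"/"matin"/"soir"/"total": on those A raises KeyError on
-- every row it reaches, and returns only when an early 'break' skips the bad row, where
-- B's single sweep itself raises KeyError.
def Pre_appliquer_ajustements_personnalises_py (courbe : List (List (String × Int))) (ajustements : List (String × Int)) : Prop :=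
  (∀ p ∈ ajustements, pvIsBoostKey p.1 = true → (pvJourNum? p.1).isSome = true) ∧
  ((∃ p ∈ ajustements, pvIsBoostKey p.1 = true) →
    ∀ r ∈ courbe, ∀ k ∈ (["jour", "matin", "soir", "total"] : List String),
      r.any (fun e => e.1 == k) = true)
instance (courbe : List (List (String × Int))) (ajustements : List (String × Int)) : Decidable (Pre_appliquer_ajustements_personnalises_py courbe ajustements) := by unfold Pre_appliquer_ajustements_personnalises_py; infer_instance

def pvWitness_appliquer_ajustements_personnalises_py : (List (List (String × Int))) × (List (String × Int)) :=
  ([[("jour", 1), ("matin", 10), ("soir", 10), ("total", 20)], [("jour", 2), ("matin", 5), ("soir", 5), ("total", 10)]],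
   [("jour_1_boost", 5)])

def Spec_appliquer_ajustements_personnalises_py (courbe : List (List (String × Int))) (ajustements : List (String × Int)) (out : List (List (String × Int))) : Prop := out = appliquer_ajustements_personnalises_py_alt courbe ajustements
instance (courbe : List (List (String × Int))) (ajustements : List (String × Int)) (out : List (List (String × Int))) : Decidable (Spec_appliquer_ajustements_personnalises_py courbe ajustements out) := by unfold Spec_appliquer_ajustements_personnalises_py; infer_instance

-- ===== CLAIM (what is proved, stated in full; the proofs are below) =====
def Claim_equal_appliquer_ajustements_personnalises_py : Prop := ∀ (courbe : List (List (String × Int))) (ajustements : List (String × Int)), Dom_appliquer_ajustements_personnalises_py courbe ajustements → Pre_appliquer_ajustements_personnalises_py courbe ajustements → Spec_appliquer_ajustements_personnalises_py courbe ajustements (appliquer_ajustements_personnalises_py courbe ajustements)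

-- ===== LEMMAS AND PROOFS =====

-- the common list of parsed boosts (day, value), and the two folds over it
def pvBoosts (ajustements : List (String × Int)) : List (Int × Int) :=
  (PySem.Dict.ofList ajustements).items.filterMap (fun kv =>
    if pvIsBoostKey kv.1 then
      match pvJourNum? kv.1 with
      | some jn => some (jn, kv.2)
      | none => none
    else none)

def pvApplyAll (bl : List (Int × Int)) (rows : List (PySem.Dict String Int)) : List (PySem.Dict String Int) :=
  bl.foldl (fun cm p => pvApplyBoost cm p.1 p.2) rows

def pvTable (bl : List (Int × Int)) : PySem.Dict Int (List Int) :=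
  bl.foldl (fun b p => b.modify p.1 [] (· ++ [p.2])) PySem.Dict.empty

theorem pvA_eq (courbe : List (List (String × Int))) (ajustements : List (String × Int)) :
    appliquer_ajustements_personnalises_py courbe ajustements
      = (pvApplyAll (pvBoosts ajustements) (courbe.map (fun j => PySem.Dict.ofList j))).map (·.items) := by
  unfold appliquer_ajustements_personnalises_py pvApplyAll pvBoosts
  rw [List.foldl_filterMap]
  refine congrArg (List.map (fun x : PySem.Dict String Int => x.items)) (List.foldl_ext _ _ _ ?_)
  intro cm kv _
  by_cases h : pvIsBoostKey kv.1 = true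
  · simp only [h, if_true]; cases hj : pvJourNum? kv.1 <;> rfl
  · simp only [Bool.not_eq_true] at h; simp [h]

theorem pvTableB_eq (ajustements : List (String × Int)) :
    (PySem.Dict.ofList ajustements).items.foldl (fun b kv =>
        if pvIsBoostKey kv.1 then
          match pvJourNum? kv.1 with
          | some jn => b.modify jn [] (· ++ [kv.2])
          | none => b
        else b) PySem.Dict.empty = pvTable (pvBoosts ajustements) := by
  unfold pvTable pvBoosts
  rw [List.foldl_filterMap]
  apply List.foldl_ext
  intro b kv _
  by_cases h : pvIsBoostKey kv.1 = true
  · simp only [h, if_true]; cases hj : pvJourNum? kv.1 <;> rfl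
  · simp only [Bool.not_eq_true] at h; simp [h]

theorem pvB_eq (courbe : List (List (String × Int))) (ajustements : List (String × Int)) :
    appliquer_ajustements_personnalises_py_alt courbe ajustements
      = (if (pvTable (pvBoosts ajustements)).items.isEmpty
          then courbe.map (fun j => (PySem.Dict.ofList j).items)
          else pvSweep (pvTable (pvBoosts ajustements)) (courbe.map (fun j => PySem.Dict.ofList j))) := by
  unfold appliquer_ajustements_personnalises_py_alt
  simp only [pvTableB_eq]

-- pvUpRow touches only "matin"/"soir"/"total": the "jour" field keeps its value
theorem pvUpRow_get_jour (r : PySem.Dict String Int) (v : Int) :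
    (pvUpRow r v).get? "jour" = r.get? "jour" := by
  unfold pvUpRow PySem.Dict.modify
  rw [PySem.Dict.get?_insert_of_ne _ _ (by decide),
      PySem.Dict.get?_insert_of_ne _ _ (by decide),
      PySem.Dict.get?_insert_of_ne _ _ (by decide)]

theorem pvApplyAll_nil (bl : List (Int × Int)) : pvApplyAll bl [] = [] := by
  induction bl with
  | nil => rfl
  | cons p bl ih => simpa [pvApplyAll, pvApplyBoost] using ih

theorem pvApplyAll_cons_none (bl : List (Int × Int)) (r : PySem.Dict String Int)
    (rs : List (PySem.Dict String Int)) (h : r.get? "jour" = none) :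
    pvApplyAll bl (r :: rs) = r :: pvApplyAll bl rs := by
  induction bl generalizing rs with
  | nil => rfl
  | cons p bl ih =>
      simp only [pvApplyAll, List.foldl_cons, pvApplyBoost, h]
      exact ih _

theorem pvApplyAll_cons_some (bl : List (Int × Int)) (d : Int) (r : PySem.Dict String Int)
    (rs : List (PySem.Dict String Int)) (h : r.get? "jour" = some d) :
    pvApplyAll bl (r :: rs)
      = ((bl.filter (fun p => p.1 == d)).map (·.2)).foldl pvUpRow r
          :: pvApplyAll (bl.filter (fun p => !(p.1 == d))) rs := by
  induction bl generalizing r rs with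
  | nil => rfl
  | cons p bl ih =>
      obtain ⟨pj, pv⟩ := p
      by_cases hd : pj = d
      · subst hd
        have hhead : (r.get? "jour" == some pj) = true := by rw [h]; simp
        have hstep : pvApplyAll ((pj, pv) :: bl) (r :: rs)
            = pvApplyAll bl (pvUpRow r pv :: rs) := by
          simp [pvApplyAll, pvApplyBoost, hhead]
        rw [hstep, ih (pvUpRow r pv) rs (by rw [pvUpRow_get_jour, h]),
            List.filter_cons_of_pos (by simp), List.filter_cons_of_neg (by simp)]
        simp
      · have hhead : (r.get? "jour" == some pj) = false := by
          rw [h]; simp; exact fun hh => hd hh.symm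
        have hstep : pvApplyAll ((pj, pv) :: bl) (r :: rs)
            = pvApplyAll bl (r :: pvApplyBoost rs pj pv) := by
          simp [pvApplyAll, pvApplyBoost, hhead]
        rw [hstep, ih r (pvApplyBoost rs pj pv) h,
            List.filter_cons_of_neg (by simp [hd]), List.filter_cons_of_pos (by simp [hd])]
        rfl

-- erase commutes with the grouping fold
theorem pvErase_modify_self {κ ν : Type} [BEq κ] [LawfulBEq κ] (t : PySem.Dict κ ν) (d : κ)
    (d0 : ν) (f : ν → ν) : (t.modify d d0 f).erase d = t.erase d := by
  unfold PySem.Dict.modify PySem.Dict.insert PySem.Dict.erase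
  by_cases hc : t.contains d = true
  · simp only [hc, if_true]
    congr 1
    induction t.items with
    | nil => rfl
    | cons q qs ih =>
        by_cases hq : (q.1 == d) = true
        · simp [hq, ih]
        · simp only [Bool.not_eq_true] at hq; simp [hq, ih]
  · simp only [hc, Bool.false_eq_true, if_false]
    simp

theorem pvErase_modify_of_ne {κ ν : Type} [BEq κ] [LawfulBEq κ] (t : PySem.Dict κ ν) {k d : κ}
    (hkd : k ≠ d) (d0 : ν) (f : ν → ν) :
    (t.modify k d0 f).erase d = (t.erase d).modify k d0 f := by
  have hget : (t.erase d).get? k = t.get? k := by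
    unfold PySem.Dict.erase PySem.Dict.get?
    congr 1
    induction t.items with
    | nil => rfl
    | cons q qs ih =>
        by_cases hq : (q.1 == k) = true
        · have : (q.1 == d) = false := by
            simp only [beq_iff_eq] at hq ⊢; simp [hq, hkd]
          simp [List.find?, hq, this]
        · simp only [Bool.not_eq_true] at hq
          by_cases hqd : (q.1 == d) = true
          · simp [List.find?, hq, hqd, ih]
          · simp only [Bool.not_eq_true] at hqd; simp [List.find?, hq, hqd, ih]
  have hcont : (t.erase d).contains k = t.contains k := by
    rw [PySem.Dict.contains_eq_isSome_get?, PySem.Dict.contains_eq_isSome_get?, hget]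
  unfold PySem.Dict.modify
  rw [PySem.Dict.getD, PySem.Dict.getD, hget]
  unfold PySem.Dict.insert PySem.Dict.erase
  by_cases hc : t.contains k = true
  · simp only [PySem.Dict.erase] at hcont
    simp only [hc, hcont, if_true]
    congr 1
    induction t.items with
    | nil => rfl
    | cons q qs ih =>
        by_cases hq : (q.1 == k) = true
        · have h1 : (q.1 == d) = false := by
            simp only [beq_iff_eq] at hq ⊢; simp [hq, hkd]
          have h2 : (k == d) = false := by simp [hkd]
          simp [hq, h1, h2, ih]
        · simp only [Bool.not_eq_true] at hq
          by_cases hqd : (q.1 == d) = true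
          · simp [hq, hqd, ih]
          · simp only [Bool.not_eq_true] at hqd; simp [hq, hqd, ih]
  · simp only [PySem.Dict.erase] at hcont
    simp only [hc, hcont, Bool.false_eq_true, if_false]
    congr 1
    have h2 : (k == d) = false := by simp [hkd]
    simp [List.filter_append, h2]

theorem pvTable_erase_aux (bl : List (Int × Int)) (d : Int) (t : PySem.Dict Int (List Int)) :
    (bl.foldl (fun b p => b.modify p.1 [] (· ++ [p.2])) t).erase d
      = (bl.filter (fun p => !(p.1 == d))).foldl (fun b p => b.modify p.1 [] (· ++ [p.2])) (t.erase d) := by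
  induction bl generalizing t with
  | nil => rfl
  | cons p bl ih =>
      by_cases hd : p.1 = d
      · rw [List.foldl_cons, ih, List.filter_cons_of_neg (by simp [hd]), hd, pvErase_modify_self]
      · rw [List.foldl_cons, ih, List.filter_cons_of_pos (by simp [hd]),
          pvErase_modify_of_ne t hd, List.foldl_cons]

theorem pvTable_erase (bl : List (Int × Int)) (d : Int) :
    (pvTable bl).erase d = pvTable (bl.filter (fun p => !(p.1 == d))) := by
  unfold pvTable
  rw [pvTable_erase_aux]
  rfl

theorem pvTable_keys (bl : List (Int × Int)) :
    (pvTable bl).keys = PySem.Set.ofList (bl.map (·.1)) := by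
  unfold pvTable
  have h := PySem.Dict.keys_foldl_modify_key bl (fun p => p.1) ([] : List Int)
    (fun _ p => (· ++ [p.2])) PySem.Dict.empty
  rw [PySem.Dict.keys_empty, PySem.Set.update_nil_left] at h
  exact h

theorem pvTable_getD (bl : List (Int × Int)) (d : Int) :
    (pvTable bl).getD d [] = (bl.filter (fun p => p.1 == d)).map (·.2) := by
  unfold pvTable
  have h := PySem.Dict.getD_foldl_modify_append bl PySem.Dict.empty d
  rw [PySem.Dict.getD_empty, List.nil_append] at h
  exact h

theorem pvTable_get? (bl : List (Int × Int)) (d : Int) (h : d ∈ bl.map (·.1)) :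
    (pvTable bl).get? d = some ((bl.filter (fun p => p.1 == d)).map (·.2)) := by
  have hc : (pvTable bl).contains d = true := by
    rw [PySem.Dict.contains_iff_mem_keys, pvTable_keys, PySem.Set.mem_ofList]
    exact h
  have hs : ((pvTable bl).get? d).isSome = true := by
    rw [← PySem.Dict.contains_eq_isSome_get?]; exact hc
  obtain ⟨vs, hvs⟩ := Option.isSome_iff_exists.mp hs
  have hgd := pvTable_getD bl d
  rw [PySem.Dict.getD, hvs, Option.getD_some] at hgd
  rw [hvs, hgd]

theorem pvTable_get?_none (bl : List (Int × Int)) (d : Int) (h : ¬ d ∈ bl.map (·.1)) :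
    (pvTable bl).get? d = none := by
  have hc : (pvTable bl).contains d = false := by
    rw [← Bool.not_eq_true, PySem.Dict.contains_iff_mem_keys, pvTable_keys, PySem.Set.mem_ofList]
    exact h
  have hiff := PySem.Dict.contains_eq_isSome_get? (pvTable bl) d
  rw [hc] at hiff
  cases hg : (pvTable bl).get? d with
  | none => rfl
  | some v => rw [hg] at hiff; simp at hiff

theorem pvMain (rows : List (PySem.Dict String Int)) (bl : List (Int × Int)) :
    (pvApplyAll bl rows).map (·.items) = pvSweep (pvTable bl) rows := by
  induction rows generalizing bl with
  | nil => rw [pvApplyAll_nil]; rfl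
  | cons r rs ih =>
      cases hj : r.get? "jour" with
      | none =>
          rw [pvApplyAll_cons_none bl r rs hj]
          simp only [List.map_cons, pvSweep, hj]
          rw [ih bl]
      | some d =>
          rw [pvApplyAll_cons_some bl d r rs hj]
          by_cases hm : d ∈ bl.map (·.1)
          · simp only [List.map_cons, pvSweep, hj, PySem.Dict.pop?, pvTable_get? bl d hm,
              Option.map_some, pvTable_erase]
            rw [ih]
          · have hfilter_nil : bl.filter (fun p => p.1 == d) = [] := by
              rw [List.filter_eq_nil_iff]
              intro p hp hpd
              exact hm (List.mem_map.mpr ⟨p, hp, by simpa using hpd⟩)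
            have hfilter_all : bl.filter (fun p => !(p.1 == d)) = bl := by
              rw [List.filter_eq_self]
              intro p hp
              simp only [Bool.not_eq_true']
              by_contra hc
              simp only [Bool.not_eq_false, beq_iff_eq] at hc
              exact hm (List.mem_map.mpr ⟨p, hp, hc⟩)
            simp only [List.map_cons, pvSweep, hj, PySem.Dict.pop?, pvTable_get?_none bl d hm,
              Option.map_none, hfilter_nil, hfilter_all, List.map_nil, List.foldl_nil]
            rw [ih bl]

theorem pvTable_empty_iff (bl : List (Int × Int)) :
    (pvTable bl).items.isEmpty = true → bl = [] := by
  intro h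
  cases hbl : bl with
  | nil => rfl
  | cons p bl' =>
      exfalso
      have hmem : p.1 ∈ (pvTable bl).keys := by
        rw [pvTable_keys, PySem.Set.mem_ofList, hbl]
        simp
      have hit : (pvTable bl).items = [] := List.isEmpty_iff.mp h
      unfold PySem.Dict.keys at hmem
      rw [hit] at hmem
      simp at hmem

-- ===== VERDICT (by name: the statement is the Claim_ definition above) =====
theorem appliquer_ajustements_personnalises_py_spec : Claim_equal_appliquer_ajustements_personnalises_py := by
  intro courbe ajustements _ _
  unfold Spec_appliquer_ajustements_personnalises_py
  rw [pvA_eq, pvB_eq]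
  by_cases he : (pvTable (pvBoosts ajustements)).items.isEmpty = true
  · rw [if_pos he, pvTable_empty_iff _ he]
    simp [pvApplyAll]
  · rw [if_neg he]
    exact pvMain _ _
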